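-- pv_equiv track=rewrite | github.com/dboddie/Indented | arch/_6502/linker.py | read_routines
-- ===== SOURCE A (Python) =====
-- def read_routines(lines):
--
--     routines = []
--     current = []
--
--     for line in lines:
--
--         l = line.lstrip()
--
--         if ":" in line and line == l and not l.startswith(";"):
--             # Start reading the new routine.
--             if current:
--                 routines.append(current)
--
--             current = [line]
--         else:
--             current.append(line)
--
--     if current:
--         routines.append(current)
--
--     return routines
-- ===== SOURCE B (Python) =====
-- def _is_marker(line):
--     l = line.lstrip()
--     return ":" in line and line == l and not l.startswith(";")
--
-- def _split_at_marker(xs):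
--     # longest prefix of non-marker lines, and the rest (starting at the first marker)
--     for i, x in enumerate(xs):
--         if _is_marker(x):
--             return xs[:i], xs[i:]
--     return xs, []
--
-- def read_routines(lines):
--     xs = list(lines)
--     pre, rest = _split_at_marker(xs)
--     routines = [pre] if pre else []
--     while rest:
--         head, tail = rest[0], rest[1:]
--         body, rest = _split_at_marker(tail)
--         routines.append([head] + body)
--     return routines
-- ===== Notes on version B (the rewrite author's own statement) =====
-- stated objective: alternative
-- what changed: Replaces A's single fold carrying a (routines, current) accumulator pair by a splitter decomposition: a helper cuts off the longest non-marker prefix, B emits the leading prefix once and then repeatedly slices head+body segments off the remainder, with no accumulator state threaded through the scan.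
import Mathlib
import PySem

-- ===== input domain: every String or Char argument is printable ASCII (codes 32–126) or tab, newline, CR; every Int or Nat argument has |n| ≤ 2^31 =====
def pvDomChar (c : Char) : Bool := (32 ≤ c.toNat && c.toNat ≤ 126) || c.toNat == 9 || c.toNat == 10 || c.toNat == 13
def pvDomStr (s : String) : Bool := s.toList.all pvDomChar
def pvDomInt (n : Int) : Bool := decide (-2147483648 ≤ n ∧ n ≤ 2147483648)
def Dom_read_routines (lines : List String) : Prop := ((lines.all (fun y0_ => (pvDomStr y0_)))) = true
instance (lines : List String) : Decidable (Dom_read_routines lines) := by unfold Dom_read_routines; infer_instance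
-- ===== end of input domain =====

-- B replaces A's stateful fold (routines, current) by a prefix-splitter decomposition; same cost, no speed claim.

-- ===== PORT A =====
-- the loop body of A, over the state (routines, current)
def pvStepA (st : List (List String) × List String) (line : String) :
    List (List String) × List String :=
  let (routines, current) := st
  let l := PySem.Str.lstrip line
  if PySem.Str.isIn ":" line && line == l && !(PySem.Str.startswith l ";") then
    if current ≠ [] then (routines ++ [current], [line]) else (routines, [line])
  else (routines, current ++ [line])

def read_routines (lines : List String) : List (List String) :=
  let st := lines.foldl pvStepA ([], [])
  if st.2 ≠ [] then st.1 ++ [st.2] else st.1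

-- ===== PORT B =====
def pvIsMarker (line : String) : Bool :=
  let l := PySem.Str.lstrip line
  PySem.Str.isIn ":" line && line == l && !(PySem.Str.startswith l ";")

-- _split_at_marker: longest non-marker prefix, and the rest starting at the first marker
def pvSplitAtMarker (xs : List String) : List String × List String :=
  match xs with
  | [] => ([], [])
  | x :: rest =>
      if pvIsMarker x then ([], x :: rest)
      else
        let (a, b) := pvSplitAtMarker rest
        (x :: a, b)

theorem pvSplitAtMarker_snd_len_le (xs : List String) :
    (pvSplitAtMarker xs).2.length ≤ xs.length := by
  induction xs with
  | nil => simp [pvSplitAtMarker]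
  | cons x rest ih =>
      simp only [pvSplitAtMarker]
      split
      · simp
      · simpa using Nat.le_succ_of_le ih

-- the while loop of B: peel one head+body segment per iteration
def pvAltLoop (rest : List String) : List (List String) :=
  match rest with
  | [] => []
  | head :: tail =>
      let p := pvSplitAtMarker tail
      (head :: p.1) :: pvAltLoop p.2
termination_by rest.length
decreasing_by
  simpa using Nat.lt_succ_of_le (pvSplitAtMarker_snd_len_le tail)

def read_routines_alt (lines : List String) : List (List String) :=
  let p := pvSplitAtMarker lines
  (if p.1 ≠ [] then [p.1] else []) ++ pvAltLoop p.2

-- ===== PRECONDITION & SPEC =====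
def Spec_read_routines (lines : List String) (out : List (List String)) : Prop := out = read_routines_alt lines
instance (lines : List String) (out : List (List String)) : Decidable (Spec_read_routines lines out) := by unfold Spec_read_routines; infer_instance

-- ===== CLAIM (what is proved, stated in full; the proofs are below) =====
def Claim_equal_read_routines : Prop := ∀ (lines : List String), Dom_read_routines lines → Spec_read_routines lines (read_routines lines)

-- ===== LEMMAS AND PROOFS =====

-- invariant of A's fold: from state (R, C) the finished result is R ++ (B run on C glued before the remaining input)
theorem pv_fold_eq (xs : List String) : ∀ (R : List (List String)) (C : List String),
    (let st := xs.foldl pvStepA (R, C); if st.2 ≠ [] then st.1 ++ [st.2] else st.1)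
      = R ++ ((if C ++ (pvSplitAtMarker xs).1 ≠ [] then [C ++ (pvSplitAtMarker xs).1] else [])
              ++ pvAltLoop (pvSplitAtMarker xs).2) := by
  induction xs with
  | nil =>
      intro R C
      by_cases h : C = [] <;> simp [pvSplitAtMarker, pvAltLoop, h]
  | cons x xs ih =>
      intro R C
      by_cases hm : pvIsMarker x = true
      · have hstep : pvStepA (R, C) x
            = if C ≠ [] then (R ++ [C], [x]) else (R, [x]) := by
          simp only [pvStepA, pvIsMarker] at hm ⊢
          rw [if_pos hm]
        by_cases hc : C = []
        · have hs : pvStepA (R, C) x = (R, [x]) := by rw [hstep]; simp [hc]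
          simp only [List.foldl_cons, hs]
          simpa [pvSplitAtMarker, hm, pvAltLoop, hc] using ih R [x]
        · have hs : pvStepA (R, C) x = (R ++ [C], [x]) := by rw [hstep]; simp [hc]
          simp only [List.foldl_cons, hs]
          have h2 := ih (R ++ [C]) [x]
          simp only at h2
          rw [h2]
          simp [pvSplitAtMarker, hm, pvAltLoop, hc]
      · have hstep : pvStepA (R, C) x = (R, C ++ [x]) := by
          simp only [pvStepA, pvIsMarker] at hm ⊢
          rw [if_neg hm]
        simp only [List.foldl_cons, hstep]
        rw [ih R (C ++ [x])]
        simp [pvSplitAtMarker, hm]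

-- ===== VERDICT (by name: the statement is the Claim_ definition above) =====
theorem read_routines_spec : Claim_equal_read_routines := by
  intro lines _
  unfold Spec_read_routines read_routines read_routines_alt
  rw [pv_fold_eq lines [] []]
  simp
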